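-- pv_equiv track=rewrite | github.com/acmfi/AdventCode | day1/rock/directions.py | path_dir
-- ===== SOURCE A (Python) =====
-- def path_dir(origh, origv, n, s, ndir):
--     paths = []
--     nt = 0
--     while nt < n:
--         if ndir in ["R", "L"]:
--             origh = origh + s
--             nt += 1
--         else:
--             origv = origv + s
--             nt += 1
--         paths.append((origh, origv))
--     return paths
-- ===== SOURCE B (Python) =====
-- def path_dir(origh, origv, n, s, ndir):
--     if ndir in ("R", "L"):
--         return [(origh + i * s, origv) for i in range(1, n + 1)]
--     return [(origh, origv + i * s) for i in range(1, n + 1)]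
-- ===== Notes on version B (the rewrite author's own statement) =====
-- stated objective: simpler
-- what changed: The per-step accumulate-and-append while loop with an in-loop direction test is replaced by hoisting the direction decision once and building the n points directly as a comprehension over range(1, n+1) with a closed-form coordinate origin + i*s.
import Mathlib
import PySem

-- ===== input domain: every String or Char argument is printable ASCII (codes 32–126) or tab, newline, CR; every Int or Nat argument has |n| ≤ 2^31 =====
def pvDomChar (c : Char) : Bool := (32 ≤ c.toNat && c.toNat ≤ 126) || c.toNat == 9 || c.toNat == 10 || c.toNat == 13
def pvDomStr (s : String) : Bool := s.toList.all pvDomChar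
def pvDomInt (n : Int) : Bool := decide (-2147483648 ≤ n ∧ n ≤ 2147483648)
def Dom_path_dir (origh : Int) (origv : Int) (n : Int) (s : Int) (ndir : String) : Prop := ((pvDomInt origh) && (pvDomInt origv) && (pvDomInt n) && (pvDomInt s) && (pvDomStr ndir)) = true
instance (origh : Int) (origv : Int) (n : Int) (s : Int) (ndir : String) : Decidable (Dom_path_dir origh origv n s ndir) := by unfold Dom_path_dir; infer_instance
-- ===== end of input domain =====

-- B hoists the direction test out of the loop and builds the points by a closed-form comprehension (simpler; same O(n) cost).

-- ===== PORT A =====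
-- the while loop: state (origh, origv, nt), appends after updating
def pathDirLoop (origh : Int) (origv : Int) (n : Int) (s : Int) (ndir : String) (nt : Int) : List (Int × Int) :=
  if _h : nt < n then
    if ndir = "R" ∨ ndir = "L" then
      (origh + s, origv) :: pathDirLoop (origh + s) origv n s ndir (nt + 1)
    else
      (origh, origv + s) :: pathDirLoop origh (origv + s) n s ndir (nt + 1)
  else []
termination_by (n - nt).toNat
decreasing_by all_goals omega

def path_dir (origh : Int) (origv : Int) (n : Int) (s : Int) (ndir : String) : List (Int × Int) :=
  pathDirLoop origh origv n s ndir 0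

-- ===== PORT B =====
def path_dir_alt (origh : Int) (origv : Int) (n : Int) (s : Int) (ndir : String) : List (Int × Int) :=
  if ndir = "R" ∨ ndir = "L" then
    (PySem.List.pyRange 1 (n + 1) 1).map (fun i => (origh + i * s, origv))
  else
    (PySem.List.pyRange 1 (n + 1) 1).map (fun i => (origh, origv + i * s))

-- ===== PRECONDITION & SPEC =====
def Spec_path_dir (origh : Int) (origv : Int) (n : Int) (s : Int) (ndir : String) (out : List (Int × Int)) : Prop := out = path_dir_alt origh origv n s ndir
instance (origh : Int) (origv : Int) (n : Int) (s : Int) (ndir : String) (out : List (Int × Int)) : Decidable (Spec_path_dir origh origv n s ndir out) := by unfold Spec_path_dir; infer_instance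

-- ===== CLAIM (what is proved, stated in full; the proofs are below) =====
def Claim_equal_path_dir : Prop := ∀ (origh : Int) (origv : Int) (n : Int) (s : Int) (ndir : String), Dom_path_dir origh origv n s ndir → Spec_path_dir origh origv n s ndir (path_dir origh origv n s ndir)

-- ===== LEMMAS AND PROOFS =====

-- the loop produces the closed-form list, horizontal case
theorem pathDirLoop_closed_h (m : Nat) : ∀ (origh origv n s nt : Int) (ndir : String),
    (ndir = "R" ∨ ndir = "L") → (n - nt).toNat = m →
    pathDirLoop origh origv n s ndir nt
      = (List.range m).map (fun (k : Nat) => ((origh + ((k : Int) + 1) * s, origv) : Int × Int)) := by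
  induction m with
  | zero =>
    intro origh origv n s nt ndir hd hm
    rw [pathDirLoop]
    rw [dif_neg (by omega)]
    simp
  | succ m ih =>
    intro origh origv n s nt ndir hd hm
    rw [pathDirLoop, dif_pos (by omega), if_pos hd,
        ih (origh + s) origv n s (nt + 1) ndir hd (by omega),
        List.range_succ_eq_map, List.map_cons, List.map_map]
    refine List.cons_eq_cons.mpr ⟨?_, ?_⟩
    · simp only [Prod.mk.injEq]
      exact ⟨by push_cast; ring, trivial⟩
    · apply List.map_congr_left
      intro k _
      simp only [Function.comp_apply, Prod.mk.injEq]
      exact ⟨by push_cast; ring, trivial⟩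

-- the loop produces the closed-form list, vertical case
theorem pathDirLoop_closed_v (m : Nat) : ∀ (origh origv n s nt : Int) (ndir : String),
    ¬ (ndir = "R" ∨ ndir = "L") → (n - nt).toNat = m →
    pathDirLoop origh origv n s ndir nt
      = (List.range m).map (fun (k : Nat) => ((origh, origv + ((k : Int) + 1) * s) : Int × Int)) := by
  induction m with
  | zero =>
    intro origh origv n s nt ndir hd hm
    rw [pathDirLoop]
    rw [dif_neg (by omega)]
    simp
  | succ m ih =>
    intro origh origv n s nt ndir hd hm
    rw [pathDirLoop, dif_pos (by omega), if_neg hd,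
        ih origh (origv + s) n s (nt + 1) ndir hd (by omega),
        List.range_succ_eq_map, List.map_cons, List.map_map]
    refine List.cons_eq_cons.mpr ⟨?_, ?_⟩
    · simp only [Prod.mk.injEq]
      exact ⟨trivial, by push_cast; ring⟩
    · apply List.map_congr_left
      intro k _
      simp only [Function.comp_apply, Prod.mk.injEq]
      exact ⟨trivial, by push_cast; ring⟩

-- ===== VERDICT (by name: the statement is the Claim_ definition above) =====
theorem path_dir_spec : Claim_equal_path_dir := by
  intro origh origv n s ndir _
  unfold Spec_path_dir path_dir path_dir_alt
  rw [PySem.List.pyRange_one]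
  have hn : n + 1 - 1 = n := by ring
  rw [hn]
  by_cases hd : ndir = "R" ∨ ndir = "L"
  · rw [if_pos hd, pathDirLoop_closed_h n.toNat origh origv n s 0 ndir hd (by omega),
        List.map_map]
    apply List.map_congr_left
    intro k _
    simp only [Function.comp_apply, Prod.mk.injEq]
    exact ⟨by ring, trivial⟩
  · rw [if_neg hd, pathDirLoop_closed_v n.toNat origh origv n s 0 ndir hd (by omega),
        List.map_map]
    apply List.map_congr_left
    intro k _
    simp only [Function.comp_apply, Prod.mk.injEq]
    exact ⟨trivial, by ring⟩
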